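-- pv_equiv track=rewrite | github.com/boris-98/test-fv | markd2/panex_puzzle/gen_panex_svh.py | top_info
-- ===== SOURCE A (Python) =====
-- from typing import Dict, List, Optional, Sequence, Tuple
--
-- State = Tuple[Tuple[int, ...], Tuple[int, ...]]  # (tile_rod, tile_lvl)
--
-- def top_info(s: int, st: State) -> Tuple[List[int], List[int], List[bool]]:
--     rods, lvls = st
--     num_tiles = 2 * s
--     max_lvl = s
--
--     top_id = [-1, -1, -1]
--     top_lvl = [-1, -1, -1]
--
--     for tile_id in range(num_tiles):
--         rod = rods[tile_id]
--         lvl = lvls[tile_id]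
--         if lvl > top_lvl[rod]:
--             top_lvl[rod] = lvl
--             top_id[rod] = tile_id
--
--     rod_full = [lvl >= max_lvl for lvl in top_lvl]
--     return top_id, top_lvl, rod_full
-- ===== SOURCE B (Python) =====
-- def top_info(s, st):
--     rods, lvls = st
--     # group tile ids by rod, then reduce each group with a first-max scan
--     groups = [[], [], []]
--     for tile_id in range(2 * s):
--         groups[rods[tile_id]].append(tile_id)
--     top_id = []
--     top_lvl = []
--     for grp in groups:
--         # (-1, -1) sentinel = "empty rod"; max picks the FIRST maximum, matching A's strict '>'
--         lvl, tid = max([(-1, -1)] + [(lvls[t], t) for t in grp], key=lambda p: p[0])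
--         top_id.append(tid)
--         top_lvl.append(lvl)
--     rod_full = [lvl >= s for lvl in top_lvl]
--     return top_id, top_lvl, rod_full
-- ===== Notes on version B (the rewrite author's own statement) =====
-- stated objective: alternative
-- what changed: Replaces A's single running-max scan with mutable top lists by a group-by-rod pass (three lists built in one sweep) followed by an independent first-max reduce per rod with a (-1,-1) sentinel.
import Mathlib
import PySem

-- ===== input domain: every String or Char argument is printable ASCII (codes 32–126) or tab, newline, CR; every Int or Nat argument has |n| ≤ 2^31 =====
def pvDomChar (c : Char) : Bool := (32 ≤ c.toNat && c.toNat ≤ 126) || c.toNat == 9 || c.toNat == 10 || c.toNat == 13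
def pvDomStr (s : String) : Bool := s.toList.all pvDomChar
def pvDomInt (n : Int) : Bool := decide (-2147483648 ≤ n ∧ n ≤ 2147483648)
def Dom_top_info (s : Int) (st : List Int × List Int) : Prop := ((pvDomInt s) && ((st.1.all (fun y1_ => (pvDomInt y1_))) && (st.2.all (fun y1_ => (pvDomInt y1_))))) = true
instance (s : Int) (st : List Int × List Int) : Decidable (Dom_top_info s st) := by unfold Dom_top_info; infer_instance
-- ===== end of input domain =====

-- B replaces A's single running-max scan by a group-by-rod pass followed by one first-max reduce
-- per rod (objective: alternative decomposition, same cost).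

-- ===== PORT A =====
-- Python list assignment xs[i] = v; exact for in-range (possibly negative) indices,
-- the only ones Pre_top_info admits (out of range Python raises IndexError).
def pySetL (xs : List Int) (i : Int) (v : Int) : List Int :=
  xs.set (if i < 0 then i + xs.length else i).toNat v

-- the body of A's `for tile_id in range(num_tiles)` loop
def bodyA (rods lvls : List Int) (acc : List Int × List Int) (tile_id : Int) : List Int × List Int :=
  let rod := PySem.List.pyGetD rods tile_id 0
  let lvl := PySem.List.pyGetD lvls tile_id 0
  if PySem.List.pyGetD acc.2 rod 0 < lvl then (pySetL acc.1 rod tile_id, pySetL acc.2 rod lvl)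
  else acc

def top_info (s : Int) (st : List Int × List Int) : List Int × List Int × List Bool :=
  let rods := st.1
  let lvls := st.2
  let num_tiles := 2 * s
  let max_lvl := s
  let p := (PySem.List.pyRange 0 num_tiles).foldl (bodyA rods lvls) ([-1, -1, -1], [-1, -1, -1])
  (p.1, p.2, p.2.map (fun lvl => decide (max_lvl ≤ lvl)))

-- ===== PORT B =====
-- Python groups[i].append(t); exact for in-range (possibly negative) indices, as above.
def appendAt (g : List (List Int)) (i : Int) (t : Int) : List (List Int) :=
  let j := (if i < 0 then i + g.length else i).toNat
  g.set j (g.getD j [] ++ [t])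

-- the body of B's grouping loop
def bodyB (rods : List Int) (g : List (List Int)) (t : Int) : List (List Int) :=
  appendAt g (PySem.List.pyGetD rods t 0) t

-- Source B's `max([(-1, -1)] + [(lvls[t], t) for t in grp], key=lambda p: p[0])`
def redPair (lvls : List Int) (grp : List Int) : Int × Int :=
  PySem.List.maxD ((-1, -1) :: grp.map (fun t => (PySem.List.pyGetD lvls t 0, t)))
    (fun p => p.1) (-1, -1)

def top_info_alt (s : Int) (st : List Int × List Int) : List Int × List Int × List Bool :=
  let rods := st.1
  let lvls := st.2
  let groups := (PySem.List.pyRange 0 (2 * s)).foldl (bodyB rods) [[], [], []]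
  let pairs := groups.map (redPair lvls)
  let top_id := pairs.map (fun p => p.2)
  let top_lvl := pairs.map (fun p => p.1)
  (top_id, top_lvl, top_lvl.map (fun lvl => decide (s ≤ lvl)))

-- ===== PRECONDITION & SPEC =====
-- Exactly where the Python A returns: every accessed index of rods and lvls exists
-- (tile_id in range(2*s)) and every accessed rod is a valid index -3 ≤ rod < 3
-- into the three-element top lists; otherwise A raises IndexError.
def Pre_top_info (s : Int) (st : List Int × List Int) : Prop :=
  2 * s ≤ (st.1.length : Int) ∧ 2 * s ≤ (st.2.length : Int) ∧
  ∀ i : Fin st.1.length, ((i : Nat) : Int) < 2 * s → -3 ≤ st.1.get i ∧ st.1.get i < 3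

instance (s : Int) (st : List Int × List Int) : Decidable (Pre_top_info s st) := by
  unfold Pre_top_info; infer_instance

def pvWitness_top_info : Int × (List Int × List Int) := (1, ([0, 1], [1, 1]))

def Spec_top_info (s : Int) (st : List Int × List Int) (out : List Int × List Int × List Bool) : Prop := out = top_info_alt s st
instance (s : Int) (st : List Int × List Int) (out : List Int × List Int × List Bool) : Decidable (Spec_top_info s st out) := by unfold Spec_top_info; infer_instance

-- ===== CLAIM (what is proved, stated in full; the proofs are below) =====
def Claim_equal_top_info : Prop := ∀ (s : Int) (st : List Int × List Int), Dom_top_info s st → Pre_top_info s st → Spec_top_info s st (top_info s st)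

-- ===== LEMMAS AND PROOFS =====

-- Python's max with key = fst over a nonempty list, as a plain foldl
lemma maxD_cons_eq (x : Int × Int) (l : List (Int × Int)) (d : Int × Int) :
    PySem.List.maxD (x :: l) (fun q => q.1) d
      = l.foldl (fun m q => if m.1 < q.1 then q else m) x := by
  induction l generalizing x with
  | nil => rfl
  | cons y ys ih =>
    rw [List.foldl_cons, ← ih (if x.1 < y.1 then y else x)]
    by_cases hc : x.1 < y.1 <;>
      simp [PySem.List.maxD, PySem.List.max?, hc]

-- Python's max (first maximum) over a nonempty list with key = fst, extended by one element.
lemma maxD_fst_snoc (x : Int × Int) (l : List (Int × Int)) (p d : Int × Int) :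
    PySem.List.maxD ((x :: l) ++ [p]) (fun q => q.1) d
      = if (PySem.List.maxD (x :: l) (fun q => q.1) d).1 < p.1 then p
        else PySem.List.maxD (x :: l) (fun q => q.1) d := by
  rw [List.cons_append, maxD_cons_eq, maxD_cons_eq, List.foldl_append, List.foldl_cons,
    List.foldl_nil]

lemma redPair_snoc (lvls : List Int) (grp : List Int) (t : Int) :
    redPair lvls (grp ++ [t])
      = if (redPair lvls grp).1 < PySem.List.pyGetD lvls t 0
        then (PySem.List.pyGetD lvls t 0, t) else redPair lvls grp := by
  unfold redPair
  rw [List.map_append]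
  exact maxD_fst_snoc _ _ _ _

-- one loop step: A's conditional update of the top lists is B's append to the group,
-- seen through the per-group reduce
set_option maxHeartbeats 1000000 in
lemma step_eq (lvls : List Int) (g0 g1 g2 : List Int) (r t : Int)
    (h0 : -3 ≤ r) (h1 : r < 3) :
    (if PySem.List.pyGetD ([g0, g1, g2].map (fun grp => (redPair lvls grp).1)) r 0
          < PySem.List.pyGetD lvls t 0
     then (pySetL ([g0, g1, g2].map (fun grp => (redPair lvls grp).2)) r t,
           pySetL ([g0, g1, g2].map (fun grp => (redPair lvls grp).1)) r
             (PySem.List.pyGetD lvls t 0))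
     else ([g0, g1, g2].map (fun grp => (redPair lvls grp).2),
           [g0, g1, g2].map (fun grp => (redPair lvls grp).1)))
    = ((appendAt [g0, g1, g2] r t).map (fun grp => (redPair lvls grp).2),
       (appendAt [g0, g1, g2] r t).map (fun grp => (redPair lvls grp).1)) := by
  interval_cases r <;>
    simp [appendAt, pySetL, PySem.List.pyGetD, PySem.List.pyGet?, PySem.List.pyIdx?,
      List.getD, redPair_snoc] <;>
    split_ifs <;> simp_all

lemma bodyB_length (rods : List Int) (g : List (List Int)) (t : Int) :
    (bodyB rods g t).length = g.length := by
  simp [bodyB, appendAt]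

-- loop invariant: A's state is the image of B's groups under the per-group reduce
lemma fold_inv (rods lvls : List Int) (ts : List Int) (g : List (List Int))
    (hg : g.length = 3)
    (hts : ∀ t ∈ ts, -3 ≤ PySem.List.pyGetD rods t 0 ∧ PySem.List.pyGetD rods t 0 < 3) :
    ts.foldl (bodyA rods lvls)
        (g.map (fun grp => (redPair lvls grp).2), g.map (fun grp => (redPair lvls grp).1))
      = ((ts.foldl (bodyB rods) g).map (fun grp => (redPair lvls grp).2),
         (ts.foldl (bodyB rods) g).map (fun grp => (redPair lvls grp).1)) := by
  induction ts generalizing g with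
  | nil => simp
  | cons t ts ih =>
    obtain ⟨h0, h1⟩ := hts t (by simp)
    match g, hg with
    | [g0, g1, g2], _ =>
      have hstep : bodyA rods lvls
            ([g0, g1, g2].map (fun grp => (redPair lvls grp).2),
             [g0, g1, g2].map (fun grp => (redPair lvls grp).1)) t
          = ((bodyB rods [g0, g1, g2] t).map (fun grp => (redPair lvls grp).2),
             (bodyB rods [g0, g1, g2] t).map (fun grp => (redPair lvls grp).1)) := by
        simp only [bodyA, bodyB]
        exact step_eq lvls g0 g1 g2 _ t h0 h1
      rw [List.foldl_cons, List.foldl_cons, hstep]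
      exact ih (bodyB rods [g0, g1, g2] t) (by simp [bodyB_length])
        (fun x hx => hts x (by simp [hx]))

theorem top_info_spec_aux (s : Int) (st : List Int × List Int)
    (hpre : Pre_top_info s st) : top_info s st = top_info_alt s st := by
  obtain ⟨h1, h2, h3⟩ := hpre
  have hts : ∀ t ∈ PySem.List.pyRange 0 (2 * s),
      -3 ≤ PySem.List.pyGetD st.1 t 0 ∧ PySem.List.pyGetD st.1 t 0 < 3 := by
    intro t ht
    rw [PySem.List.mem_pyRange_one] at ht
    have hlt : t < (st.1.length : Int) := lt_of_lt_of_le ht.2 h1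
    have hidx : PySem.List.pyGetD st.1 t 0 = st.1[t.toNat]'(by omega) :=
      PySem.List.pyGetD_eq_getElem st.1 0 ht.1 hlt
    have hcond : ((t.toNat : Nat) : Int) < 2 * s := by omega
    have hb := h3 ⟨t.toNat, by omega⟩ hcond
    rw [hidx]
    simpa using hb
  have h0 := fold_inv st.1 st.2 (PySem.List.pyRange 0 (2 * s)) [[], [], []] rfl hts
  simp only [top_info, top_info_alt]
  rw [show (([-1, -1, -1], [-1, -1, -1]) : List Int × List Int)
        = ([[], [], []].map (fun grp => (redPair st.2 grp).2),
           [[], [], []].map (fun grp => (redPair st.2 grp).1)) from rfl]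
  rw [h0]
  simp [List.map_map, Function.comp]

-- ===== VERDICT (by name: the statement is the Claim_ definition above) =====
theorem top_info_spec : Claim_equal_top_info := by
  intro s st _ hpre
  unfold Spec_top_info
  exact top_info_spec_aux s st hpre
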